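-- pv_equiv track=rewrite | github.com/xiaoyatang/DS4140Spring2025 | A5/q1.py | misra_gries
-- ===== SOURCE A (Python) =====
-- def misra_gries(stream, k):
--     counters = {}
--     for element in stream:
--         if element in counters: # if element has been counted, increment the count
--             counters[element] += 1
--         elif len(counters) < k: # if no match and a counter is 0, reassign the label
--             counters[element] = 1
--         else:
--             for key in list(counters.keys()): # decrement all counters.
--                 counters[key] -= 1
--                 if counters[key] == 0:
--                     del counters[key]
--     return counters
-- ===== SOURCE B (Python) =====
-- def misra_gries(stream, k):
--     # Run-length compressed traversal with batched eviction: a run of m equal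
--     # elements costs O(1) dict updates, and the cascade of full decrement passes
--     # inside a run collapses into one subtraction of t = min(m, min counter).
--     counters = {}
--     n = len(stream)
--     i = 0
--     while i < n:
--         x = stream[i]
--         j = i + 1
--         while j < n and stream[j] == x:
--             j += 1
--         m = j - i
--         i = j
--         if x in counters:
--             counters[x] += m
--         elif len(counters) < k:
--             counters[x] = m
--         elif counters:
--             t = min(m, min(counters.values()))
--             counters = {key: v - t for key, v in counters.items() if v > t}
--             if m > t:
--                 counters[x] = m - t
--     return counters
-- ===== Notes on version B (the rewrite author's own statement) =====
-- stated objective: alternative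
-- what changed: B traverses the stream run-length-compressed with an index two-pointer scan and collapses each run of m equal elements into O(1) dict operations: one += m, one insert of m, or one batched eviction subtracting t = min(m, min counter value) from every counter at once, instead of A's per-element branch with a full per-key decrement pass per evicting element.
import Mathlib
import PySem

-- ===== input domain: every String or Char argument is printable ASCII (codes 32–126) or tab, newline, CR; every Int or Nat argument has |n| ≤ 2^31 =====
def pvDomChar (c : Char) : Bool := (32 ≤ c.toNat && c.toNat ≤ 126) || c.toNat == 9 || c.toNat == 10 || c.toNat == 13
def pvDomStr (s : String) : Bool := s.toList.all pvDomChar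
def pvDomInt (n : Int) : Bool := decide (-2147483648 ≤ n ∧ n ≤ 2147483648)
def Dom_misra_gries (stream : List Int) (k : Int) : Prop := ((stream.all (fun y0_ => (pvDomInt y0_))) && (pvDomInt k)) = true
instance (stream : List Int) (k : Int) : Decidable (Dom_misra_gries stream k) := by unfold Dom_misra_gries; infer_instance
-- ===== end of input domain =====

-- B replaces A's per-element processing by a run-length-compressed traversal: each run
-- of m equal elements becomes O(1) dict operations, A's cascaded full decrement passes
-- within a run collapse into one batched subtraction (objective: alternative algorithm).

-- ===== PORT A =====
-- body of A's inner loop: counters[key] -= 1; if counters[key] == 0: del counters[key]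
-- (key is always present when this runs, so modify/getD are exact for Python's counters[key])
def mgDecStep (d : PySem.Dict Int Int) (key : Int) : PySem.Dict Int Int :=
  let d' := d.modify key 0 (· - 1)
  if d'.getD key 0 == 0 then d'.erase key else d'

def mgStepA (k : Int) (d : PySem.Dict Int Int) (x : Int) : PySem.Dict Int Int :=
  if d.contains x then d.modify x 0 (· + 1)
  else if (d.size : Int) < k then d.insert x 1
  else d.keys.foldl mgDecStep d

def misra_gries (stream : List Int) (k : Int) : List (Int × Int) :=
  (stream.foldl (mgStepA k) PySem.Dict.empty).items

-- ===== PORT B =====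
-- one run of m copies of x (Source B's loop body after the inner while measured the run):
-- += m, insert m, or batched eviction by t = min(m, min(counters.values()))
def mgRunStep (k : Int) (d : PySem.Dict Int Int) (x : Int) (m : Int) : PySem.Dict Int Int :=
  if d.contains x then d.modify x 0 (· + m)
  else if (d.size : Int) < k then d.insert x m
  else if d.items.isEmpty then d
  else
    let t := min m ((PySem.List.min? d.values (fun v => v)).getD 0)
    let d' := PySem.Dict.mk ((d.items.filter (fun p => decide (t < p.2))).map (fun p => (p.1, p.2 - t)))
    if t < m then d'.insert x (m - t) else d'

-- Source B's outer while over the index i: the inner while scans the run (takeWhile /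
-- dropWhile compute exactly stream[i..j) and the rest), then one mgRunStep.
def mgAltGo (k : Int) (d : PySem.Dict Int Int) : List Int → PySem.Dict Int Int
  | [] => d
  | x :: t =>
    mgAltGo k (mgRunStep k d x (((t.takeWhile (fun y => y == x)).length : Int) + 1))
      (t.dropWhile (fun y => y == x))
termination_by l => l.length
decreasing_by
  simp only [List.length_cons]
  exact Nat.lt_succ_of_le (List.length_dropWhile_le _ _)

def misra_gries_alt (stream : List Int) (k : Int) : List (Int × Int) :=
  (mgAltGo k PySem.Dict.empty stream).items

-- ===== PRECONDITION & SPEC =====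
def Spec_misra_gries (stream : List Int) (k : Int) (out : List (Int × Int)) : Prop := out = misra_gries_alt stream k
instance (stream : List Int) (k : Int) (out : List (Int × Int)) : Decidable (Spec_misra_gries stream k out) := by unfold Spec_misra_gries; infer_instance

-- ===== CLAIM (what is proved, stated in full; the proofs are below) =====
def Claim_equal_misra_gries : Prop := ∀ (stream : List Int) (k : Int), Dom_misra_gries stream k → Spec_misra_gries stream k (misra_gries stream k)

-- ===== LEMMAS AND PROOFS =====

-- invariant of A's counters dict: distinct keys, positive counts, at most k entries
-- (or the dict is empty, covering k ≤ 0)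
def mgInv (k : Int) (d : PySem.Dict Int Int) : Prop :=
  d.keys.Nodup ∧ (∀ p ∈ d.items, 1 ≤ p.2) ∧ (d.items = [] ∨ (d.items.length : Int) ≤ k)

-- A's value of an item after one full decrement pass
def mgDec (p : Int × Int) : Option (Int × Int) :=
  if p.2 - 1 = 0 then none else some (p.1, p.2 - 1)

-- mgDecStep ignores a head entry whose key it does not touch
lemma mgDecStep_cons (a : Int) (w : Int) (t : List (Int × Int)) (key : Int) (h : key ≠ a) :
    mgDecStep (PySem.Dict.mk ((a, w) :: t)) key
      = PySem.Dict.mk ((a, w) :: (mgDecStep (PySem.Dict.mk t) key).items) := by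
  simp only [mgDecStep, PySem.Dict.modify, PySem.Dict.insert, PySem.Dict.getD, PySem.Dict.get?,
    PySem.Dict.contains, PySem.Dict.erase, List.any_cons, List.find?_cons]
  have hba : (a == key) = false := by simp; exact fun e => h e.symm
  simp [hba]
  split_ifs <;> simp_all

lemma mgDecStep_foldl_cons (ks : List Int) (a : Int) (w : Int) (t : List (Int × Int))
    (h : a ∉ ks) :
    (ks.foldl mgDecStep (PySem.Dict.mk ((a, w) :: t))).items
      = (a, w) :: (ks.foldl mgDecStep (PySem.Dict.mk t)).items := by
  induction ks generalizing t with
  | nil => rfl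
  | cons key ks ih =>
    have hk : key ≠ a := fun e => h (by simp [e])
    have h' : a ∉ ks := fun e => h (by simp [e])
    simp only [List.foldl_cons, mgDecStep_cons a w t key hk]
    rw [ih _ h']

-- A's whole decrement pass is filterMap mgDec (keys distinct)
lemma mgDecLoop_eq (l : List (Int × Int)) (hnd : (l.map Prod.fst).Nodup) :
    ((l.map Prod.fst).foldl mgDecStep (PySem.Dict.mk l)).items = l.filterMap mgDec := by
  induction l with
  | nil => rfl
  | cons p t ih =>
    obtain ⟨a, w⟩ := p
    simp only [List.map_cons, List.nodup_cons] at hnd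
    obtain ⟨ha, hnd'⟩ := hnd
    have hstep : mgDecStep (PySem.Dict.mk ((a, w) :: t)) a
        = if w - 1 = 0 then PySem.Dict.mk t else PySem.Dict.mk ((a, w - 1) :: t) := by
      have hmap : t.map (fun p => if (p.1 == a) = true then (a, w - 1) else p) = t := by
        have := List.map_congr_left (l := t)
          (f := fun p : Int × Int => if (p.1 == a) = true then (a, w - 1) else p) (g := id)
          (by intro p hp
              have : p.1 ≠ a := fun e => ha (e ▸ List.mem_map_of_mem hp)
              simp [this])
        simpa using this
      have hfil : t.filter (fun p => !(p.1 == a)) = t := by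
        apply List.filter_eq_self.2
        intro p hp
        have : p.1 ≠ a := fun e => ha (e ▸ List.mem_map_of_mem hp)
        simp [this]
      simp only [mgDecStep, PySem.Dict.modify, PySem.Dict.insert, PySem.Dict.getD,
        PySem.Dict.get?, PySem.Dict.contains, PySem.Dict.erase,
        List.any_cons, List.find?_cons, List.filter_cons]
      simp [hmap, hfil]
      split_ifs <;> simp_all <;> omega
    simp only [List.map_cons, List.foldl_cons, hstep]
    by_cases hw : w - 1 = 0
    · rw [if_pos hw, ih hnd']
      simp [mgDec, hw]
    · rw [if_neg hw]
      calc ((t.map Prod.fst).foldl mgDecStep (PySem.Dict.mk ((a, w - 1) :: t))).items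
          = (a, w - 1) :: ((t.map Prod.fst).foldl mgDecStep (PySem.Dict.mk t)).items :=
            mgDecStep_foldl_cons (t.map Prod.fst) a (w - 1) t ha
        _ = List.filterMap mgDec ((a, w) :: t) := by
            rw [ih hnd']; simp [mgDec, hw]

-- filterMap mgDec on positive values = filter (1 < v) then subtract 1
lemma mgDec_filterMap : ∀ (l : List (Int × Int)), (∀ p ∈ l, 1 ≤ p.2) →
    l.filterMap mgDec = (l.filter (fun p => decide (1 < p.2))).map (fun p => (p.1, p.2 - 1))
  | [], _ => rfl
  | p :: t, hpos => by
    have hp : 1 ≤ p.2 := hpos p (by simp)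
    have ih := mgDec_filterMap t (fun q hq => hpos q (by simp [hq]))
    by_cases h : p.2 - 1 = 0
    · have h0 : mgDec p = none := by simp [mgDec, h]
      have hb : (decide (1 < p.2)) = false := by simp only [decide_eq_false_iff_not]; omega
      simp only [List.filterMap_cons_none h0, List.filter_cons, hb, Bool.false_eq_true,
        if_false, ih]
    · have h0 : mgDec p = some (p.1, p.2 - 1) := by simp [mgDec, h]
      have hb : (decide (1 < p.2)) = true := by simp only [decide_eq_true_eq]; omega
      simp only [List.filterMap_cons_some h0, List.filter_cons, hb, if_true, List.map_cons, ih]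

-- with positive values, the pass is filter (1 < v) then subtract 1
lemma mgPass_eq (d : PySem.Dict Int Int) (hnd : d.keys.Nodup)
    (hpos : ∀ p ∈ d.items, 1 ≤ p.2) :
    (d.keys.foldl mgDecStep d).items
      = (d.items.filter (fun p => decide (1 < p.2))).map (fun p => (p.1, p.2 - 1)) := by
  have h1 : (d.keys.foldl mgDecStep d).items = d.items.filterMap mgDec := by
    have : d = PySem.Dict.mk d.items := rfl
    rw [this]
    exact mgDecLoop_eq d.items hnd
  rw [h1]
  exact mgDec_filterMap d.items hpos

-- modify on a present key rewrites exactly that item (distinct keys)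
lemma mgModify_items (d : PySem.Dict Int Int) (x : Int) (f : Int → Int)
    (hnd : d.keys.Nodup) (hc : d.contains x = true) :
    (d.modify x 0 f).items = d.items.map (fun p => if p.1 = x then (p.1, f p.2) else p) := by
  have hmod : d.modify x 0 f = d.insert x (f (d.getD x 0)) := rfl
  rw [hmod, PySem.Dict.items_insert_of_contains d _ hc]
  apply List.map_congr_left
  intro p hp
  by_cases hpx : p.1 = x
  · have hmem : (x, p.2) ∈ d.items := by rw [← hpx]; exact hp
    have hg : d.getD x 0 = p.2 := PySem.Dict.getD_of_mem_items d hmem hnd 0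
    simp [hpx, hg]
  · simp [hpx]

-- j increments of a present key add j to its count
lemma mgBump (k x : Int) (j : Nat) (d : PySem.Dict Int Int)
    (hnd : d.keys.Nodup) (hc : d.contains x = true) :
    ((List.replicate j x).foldl (mgStepA k) d).items
      = d.items.map (fun p => if p.1 = x then (p.1, p.2 + (j : Int)) else p) := by
  induction j generalizing d with
  | zero =>
    simp only [List.replicate, List.foldl_nil, Nat.cast_zero, add_zero]
    conv_lhs => rw [← List.map_id d.items]
    apply List.map_congr_left
    intro p _
    by_cases hpx : p.1 = x
    · simp only [hpx, if_true, if_pos, id]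
      exact Prod.ext hpx rfl
    · simp [hpx]
  | succ j ih =>
    rw [List.replicate_succ, List.foldl_cons]
    have hstep : mgStepA k d x = d.modify x 0 (· + 1) := by simp only [mgStepA, hc, if_true]
    rw [hstep]
    have hitems : (d.modify x 0 (· + 1)).items
        = d.items.map (fun p => if p.1 = x then (p.1, p.2 + 1) else p) :=
      mgModify_items d x (· + 1) hnd hc
    have hkeys : (d.modify x 0 (· + 1)).keys = d.keys := by
      simp only [PySem.Dict.keys, hitems, List.map_map]
      apply List.map_congr_left
      intro p _
      by_cases hpx : p.1 = x <;> simp [hpx]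
    have hc1 : (d.modify x 0 (· + 1)).contains x = true := by
      rw [PySem.Dict.contains_modify]; simp
    rw [ih _ (hkeys ▸ hnd) hc1, hitems, List.map_map]
    apply List.map_congr_left
    intro p _
    by_cases hpx : p.1 = x
    · simp only [Function.comp, hpx, if_true, if_pos]
      refine Prod.ext rfl ?_
      push_cast
      ring
    · simp [Function.comp, hpx]

-- a fresh key with room: insert then j-1 increments gives count j
lemma mgFresh (k x : Int) (j : Nat) (d : PySem.Dict Int Int)
    (hnd : d.keys.Nodup) (hc : d.contains x = false) (hs : (d.size : Int) < k) :
    ((List.replicate (j + 1) x).foldl (mgStepA k) d).items = d.items ++ [(x, (j : Int) + 1)] := by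
  rw [List.replicate_succ, List.foldl_cons]
  have hstep : mgStepA k d x = d.insert x 1 := by
    simp only [mgStepA, hc, Bool.false_eq_true, if_false, hs, if_true]
  rw [hstep]
  have hnd1 : (d.insert x 1).keys.Nodup := PySem.Dict.nodup_keys_insert d x 1 hnd
  rw [mgBump k x j _ hnd1 (PySem.Dict.contains_insert_self d x 1),
    PySem.Dict.items_insert_of_not_contains d 1 hc, List.map_append]
  have hfst : ∀ p ∈ d.items, p.1 ≠ x := by
    intro p hp he
    have : x ∈ d.keys := by
      simp only [PySem.Dict.keys]
      exact he ▸ List.mem_map_of_mem hp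
    rw [(PySem.Dict.contains_iff_mem_keys d x).2 this] at hc
    exact Bool.true_eq_false.mp hc
  have hleft : d.items.map (fun p => if p.1 = x then (p.1, p.2 + (j : Int)) else p) = d.items := by
    conv_rhs => rw [← List.map_id d.items]
    exact List.map_congr_left (fun p hp => by simp [hfst p hp])
  rw [hleft]
  simp [add_comm]

-- foldl min commutes with subtracting a constant
lemma foldl_min_sub : ∀ (l : List Int) (a c : Int),
    (l.map (fun v => v - c)).foldl min (a - c) = l.foldl min a - c
  | [], _, _ => rfl
  | b :: t, a, c => by
    simp only [List.map_cons, List.foldl_cons, min_sub_sub_right]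
    exact foldl_min_sub t (min a b) c

-- the batched eviction: j copies of a fresh key on a full dict
lemma mgEvict (k x : Int) (j : Nat) (d : PySem.Dict Int Int)
    (hnd : d.keys.Nodup) (hpos : ∀ p ∈ d.items, 1 ≤ p.2) (hne : d.items ≠ [])
    (hc : d.contains x = false) (hk : (d.items.length : Int) = k) :
    ((List.replicate (j + 1) x).foldl (mgStepA k) d).items =
      (let t := min ((j : Int) + 1) ((PySem.List.min? d.values (fun v => v)).getD 0)
       let base := (d.items.filter (fun p => decide (t < p.2))).map (fun p => (p.1, p.2 - t))
       if t < (j : Int) + 1 then base ++ [(x, (j : Int) + 1 - t)] else base) := by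
  induction j generalizing d hnd hpos hne hc hk with
  | zero =>
    -- one element: exactly one decrement pass; t = 1 because the minimum count is ≥ 1
    obtain ⟨mv, hmv⟩ : ∃ mv, PySem.List.min? d.values (fun v => v) = some mv := by
      cases hmin : PySem.List.min? d.values (fun v => v) with
      | none =>
        rw [PySem.List.min?_eq_none_iff] at hmin
        simp only [PySem.Dict.values] at hmin
        exact absurd (List.map_eq_nil_iff.mp hmin) hne
      | some mv => exact ⟨mv, rfl⟩
    have hmvpos : 1 ≤ mv := by
      have := PySem.List.min?_mem hmv
      simp only [PySem.Dict.values, List.mem_map] at this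
      obtain ⟨p, hp, he⟩ := this
      exact he ▸ hpos p hp
    have hns : ¬ ((d.size : Int) < k) := by
      simp only [PySem.Dict.size, hk]; omega
    have hstep : mgStepA k d x = d.keys.foldl mgDecStep d := by
      simp only [mgStepA, hc, Bool.false_eq_true, if_false, hns]
    simp only [List.replicate_succ, List.replicate, List.foldl_cons, List.foldl_nil, hstep,
      hmv, Option.getD_some, Nat.cast_zero, zero_add]
    have ht : min 1 mv = 1 := by omega
    rw [ht, if_neg (by omega)]
    exact mgPass_eq d hnd hpos
  | succ j ih =>
    obtain ⟨mv, hmv⟩ : ∃ mv, PySem.List.min? d.values (fun v => v) = some mv := by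
      cases hmin : PySem.List.min? d.values (fun v => v) with
      | none =>
        rw [PySem.List.min?_eq_none_iff] at hmin
        simp only [PySem.Dict.values] at hmin
        exact absurd (List.map_eq_nil_iff.mp hmin) hne
      | some mv => exact ⟨mv, rfl⟩
    have hmvmem : ∃ p ∈ d.items, p.2 = mv := by
      have := PySem.List.min?_mem hmv
      simp only [PySem.Dict.values, List.mem_map] at this
      obtain ⟨p, hp, he⟩ := this
      exact ⟨p, hp, he⟩
    have hmvmin : ∀ p ∈ d.items, mv ≤ p.2 := by
      intro p hp
      exact PySem.List.min?_isMin hmv p.2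
        (by simp only [PySem.Dict.values, List.mem_map]; exact ⟨p, hp, rfl⟩)
    have hmvpos : 1 ≤ mv := by obtain ⟨p, hp, he⟩ := hmvmem; exact he ▸ hpos p hp
    have hns : ¬ ((d.size : Int) < k) := by
      simp only [PySem.Dict.size, hk]; omega
    have hstep : mgStepA k d x = d.keys.foldl mgDecStep d := by
      simp only [mgStepA, hc, Bool.false_eq_true, if_false, hns]
    rw [List.replicate_succ, List.foldl_cons, hstep, hmv, Option.getD_some]
    push_cast
    have hI1 : (d.keys.foldl mgDecStep d).items
        = (d.items.filter (fun p => decide (1 < p.2))).map (fun p => (p.1, p.2 - 1)) :=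
      mgPass_eq d hnd hpos
    have hkeys1 : (d.keys.foldl mgDecStep d).keys
        = (d.items.filter (fun p => decide (1 < p.2))).map (fun p => p.1) := by
      have hI1k := hI1
      simp only [PySem.Dict.keys] at hI1k ⊢
      rw [hI1k, List.map_map]
      rfl
    have hkeysub : ((d.keys.foldl mgDecStep d).keys).Sublist d.keys := by
      rw [hkeys1]
      simp only [PySem.Dict.keys]
      exact List.Sublist.map _ List.filter_sublist
    have hnd1 : (d.keys.foldl mgDecStep d).keys.Nodup := hnd.sublist hkeysub
    have hc1 : (d.keys.foldl mgDecStep d).contains x = false := by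
      by_contra h
      have h' : (d.keys.foldl mgDecStep d).contains x = true := by
        cases hcc : (d.keys.foldl mgDecStep d).contains x
        · exact absurd hcc h
        · rfl
      have hx : x ∈ d.keys := hkeysub.mem ((PySem.Dict.contains_iff_mem_keys _ x).1 h')
      rw [(PySem.Dict.contains_iff_mem_keys d x).2 hx] at hc
      exact Bool.true_eq_false.mp hc
    by_cases hone : mv = 1
    · -- a counter dies in the first pass: room opens, the rest of the run re-inserts x
      have hlt : ((d.keys.foldl mgDecStep d).size : Int) < k := by
        obtain ⟨p0, hp0, he0⟩ := hmvmem
        have : (d.items.filter (fun p => decide (1 < p.2))).length < d.items.length := by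
          apply List.length_filter_lt_length_iff_exists.2
          exact ⟨p0, hp0, by simp [he0, hone]⟩
        simp only [PySem.Dict.size, hI1, List.length_map]
        omega
      rw [mgFresh k x j _ hnd1 hc1 hlt, hI1]
      have ht : min ((j : Int) + 1 + 1) mv = 1 := by omega
      rw [ht, if_pos (by omega)]
      norm_num
    · -- nobody dies: every counter just dropped by one; recurse on the rest of the run
      have hfil : d.items.filter (fun p => decide (1 < p.2)) = d.items := by
        apply List.filter_eq_self.2
        intro p hp
        have := hmvmin p hp
        simp only [decide_eq_true_eq]
        omega
      have hI1' : (d.keys.foldl mgDecStep d).items = d.items.map (fun p => (p.1, p.2 - 1)) := by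
        rw [hI1, hfil]
      have hpos1 : ∀ p ∈ (d.keys.foldl mgDecStep d).items, 1 ≤ p.2 := by
        rw [hI1']
        intro p hp
        obtain ⟨q, hq, he⟩ := List.mem_map.1 hp
        have := hmvmin q hq
        rw [← he]
        simp only
        omega
      have hne1 : (d.keys.foldl mgDecStep d).items ≠ [] := by
        rw [hI1']
        simp only [ne_eq, List.map_eq_nil_iff]
        exact hne
      have hk1 : (((d.keys.foldl mgDecStep d).items.length : Int)) = k := by
        rw [hI1', List.length_map]; exact hk
      have hmin1 : PySem.List.min? (d.keys.foldl mgDecStep d).values (fun v => v)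
          = some (mv - 1) := by
        obtain ⟨q, qt, hq⟩ : ∃ q qt, d.items = q :: qt := by
          cases hd : d.items with
          | nil => exact absurd hd hne
          | cons q qt => exact ⟨q, qt, rfl⟩
        have hv1 : (d.keys.foldl mgDecStep d).values
            = (q.2 - 1) :: (qt.map (fun p => p.2)).map (fun v => v - 1) := by
          simp only [PySem.Dict.values, hI1', hq, List.map_cons, List.map_map]
          rfl
        have hv : d.values = q.2 :: qt.map (fun p => p.2) := by
          simp only [PySem.Dict.values, hq, List.map_cons]
        rw [hv1, PySem.List.min?_id_cons, foldl_min_sub]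
        rw [hv, PySem.List.min?_id_cons] at hmv
        have : List.foldl min q.2 (qt.map fun p => p.2) = mv := by injection hmv
        rw [this]
      have hIH := ih (d.keys.foldl mgDecStep d) hnd1 hpos1 hne1 hc1 hk1
      rw [hmin1, Option.getD_some, hI1'] at hIH
      rw [hIH]
      have hcomp : ((fun p : Int × Int => decide (min ((j:Int) + 1) (mv - 1) < p.2))
            ∘ (fun p : Int × Int => (p.1, p.2 - 1)))
          = (fun p : Int × Int => decide (min ((j : Int) + 1 + 1) mv < p.2)) := by
        funext p
        simp only [Function.comp]
        have : (min ((j:Int) + 1) (mv - 1) < p.2 - 1) ↔ (min ((j : Int) + 1 + 1) mv < p.2) := by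
          omega
        simp [this]
      have hmm : ((fun p : Int × Int => (p.1, p.2 - min ((j:Int) + 1) (mv - 1)))
            ∘ (fun p : Int × Int => (p.1, p.2 - 1)))
          = (fun p : Int × Int => (p.1, p.2 - min ((j : Int) + 1 + 1) mv)) := by
        funext p
        simp only [Function.comp]
        refine Prod.ext rfl ?_
        simp only
        omega
      simp only [List.filter_map, List.map_map, hcomp, hmm]
      by_cases hcond : min ((j : Int) + 1 + 1) mv < (j : Int) + 1 + 1
      · rw [if_pos (by omega : min ((j:Int) + 1) (mv - 1) < (j : Int) + 1), if_pos hcond]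
        have : (j : Int) + 1 - min ((j:Int) + 1) (mv - 1)
            = (j : Int) + 1 + 1 - min ((j : Int) + 1 + 1) mv := by omega
        rw [this]
      · rw [if_neg (by omega : ¬ min ((j:Int) + 1) (mv - 1) < (j : Int) + 1), if_neg hcond]

-- one whole run: A's per-element fold equals B's run step, and the invariant survives
lemma mgRun (k x : Int) (j : Nat) (d : PySem.Dict Int Int) (hinv : mgInv k d) :
    (List.replicate (j + 1) x).foldl (mgStepA k) d = mgRunStep k d x ((j : Int) + 1)
      ∧ mgInv k (mgRunStep k d x ((j : Int) + 1)) := by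
  obtain ⟨hnd, hpos, hsz⟩ := hinv
  by_cases hc : d.contains x = true
  · -- present key: j+1 increments = one += (j+1)
    have hrs : mgRunStep k d x ((j : Int) + 1) = d.modify x 0 (· + ((j : Int) + 1)) := by
      simp only [mgRunStep, hc, if_true]
    have hitems : (d.modify x 0 (· + ((j : Int) + 1))).items
        = d.items.map (fun p => if p.1 = x then (p.1, p.2 + ((j : Int) + 1)) else p) :=
      mgModify_items d x _ hnd hc
    constructor
    · apply PySem.Dict.ext
      rw [mgBump k x (j + 1) d hnd hc, hrs, hitems]
      apply List.map_congr_left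
      intro p _
      by_cases hpx : p.1 = x
      · simp only [hpx, if_pos]
        refine Prod.ext rfl ?_
        push_cast
        ring
      · simp [hpx]
    · rw [hrs]
      refine ⟨?_, ?_, ?_⟩
      · have : (d.modify x 0 (· + ((j : Int) + 1))).keys = d.keys := by
          simp only [PySem.Dict.keys, hitems, List.map_map]
          apply List.map_congr_left
          intro p _
          by_cases hpx : p.1 = x <;> simp [hpx]
        rw [this]; exact hnd
      · rw [hitems]
        intro p hp
        obtain ⟨q, hq, he⟩ := List.mem_map.1 hp
        have h1 := hpos q hq
        rw [← he]
        by_cases hqx : q.1 = x <;> simp only [hqx, if_pos] <;> simp <;> omega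
      · rw [hitems, List.length_map]
        rcases hsz with h | h
        · left; rw [h]; rfl
        · exact Or.inr h
  · have hcf : d.contains x = false := by
      cases hcc : d.contains x
      · rfl
      · exact absurd hcc hc
    by_cases hs : (d.size : Int) < k
    · -- fresh key with room: insert with count j+1
      have hrs : mgRunStep k d x ((j : Int) + 1) = d.insert x ((j : Int) + 1) := by
        simp only [mgRunStep, hcf, Bool.false_eq_true, if_false, hs, if_true]
      constructor
      · apply PySem.Dict.ext
        rw [mgFresh k x j d hnd hcf hs, hrs, PySem.Dict.items_insert_of_not_contains d _ hcf]
      · rw [hrs]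
        refine ⟨PySem.Dict.nodup_keys_insert d x _ hnd, ?_, ?_⟩
        · rw [PySem.Dict.items_insert_of_not_contains d _ hcf]
          intro p hp
          rcases List.mem_append.1 hp with h | h
          · exact hpos p h
          · simp only [List.mem_singleton] at h
            rw [h]
            simp only
            omega
        · rw [PySem.Dict.items_insert_of_not_contains d _ hcf]
          right
          simp only [List.length_append, List.length_singleton]
          simp only [PySem.Dict.size] at hs
          push_cast
          omega
    · by_cases hemp : d.items = []
      · -- k ≤ 0 and the dict is empty: every element of the run is a no-op
        have hrs : mgRunStep k d x ((j : Int) + 1) = d := by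
          simp only [mgRunStep, hcf, Bool.false_eq_true, if_false, hs, hemp,
            List.isEmpty_nil, if_true]
        have hstep : mgStepA k d x = d := by
          simp only [mgStepA, hcf, Bool.false_eq_true, if_false, hs, PySem.Dict.keys, hemp,
            List.map_nil, List.foldl_nil]
        have hall : ∀ m : Nat, (List.replicate m x).foldl (mgStepA k) d = d := by
          intro m
          induction m with
          | zero => rfl
          | succ m ihm => rw [List.replicate_succ, List.foldl_cons, hstep, ihm]
        exact ⟨(hall (j + 1)).trans hrs.symm, by rw [hrs]; exact ⟨hnd, hpos, hsz⟩⟩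
      · -- full dict: batched eviction
        have hk : (d.items.length : Int) = k := by
          rcases hsz with h | h
          · exact absurd h hemp
          · simp only [PySem.Dict.size] at hs
            omega
        have hie : d.items.isEmpty = false := by
          cases hd : d.items with
          | nil => exact absurd hd hemp
          | cons q qt => rfl
        have hrs : mgRunStep k d x ((j : Int) + 1)
            = (let t := min ((j : Int) + 1) ((PySem.List.min? d.values (fun v => v)).getD 0)
               let d' := PySem.Dict.mk ((d.items.filter (fun p => decide (t < p.2))).map
                 (fun p => (p.1, p.2 - t)))
               if t < (j : Int) + 1 then d'.insert x ((j : Int) + 1 - t) else d') := by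
          simp only [mgRunStep, hcf, Bool.false_eq_true, if_false, hs, hie]
        set t := min ((j : Int) + 1) ((PySem.List.min? d.values (fun v => v)).getD 0) with htdef
        set base := (d.items.filter (fun p => decide (t < p.2))).map (fun p => (p.1, p.2 - t))
          with hbdef
        set d' := PySem.Dict.mk base with hd'def
        have hd'items : d'.items = base := rfl
        have hd'keys : d'.keys = (d.items.filter (fun p => decide (t < p.2))).map (fun p => p.1) := by
          simp only [PySem.Dict.keys, hd'items, hbdef, List.map_map]
          rfl
        have hd'sub : d'.keys.Sublist d.keys := by
          rw [hd'keys]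
          simp only [PySem.Dict.keys]
          exact List.Sublist.map _ List.filter_sublist
        have hnd' : d'.keys.Nodup := hnd.sublist hd'sub
        have hc' : d'.contains x = false := by
          by_contra h
          have h' : d'.contains x = true := by
            cases hcc : d'.contains x
            · exact absurd hcc h
            · rfl
          have hx : x ∈ d.keys := hd'sub.mem ((PySem.Dict.contains_iff_mem_keys d' x).1 h')
          rw [(PySem.Dict.contains_iff_mem_keys d x).2 hx] at hcf
          exact Bool.true_eq_false.mp hcf
        have hpos' : ∀ p ∈ d'.items, 1 ≤ p.2 := by
          rw [hd'items, hbdef]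
          intro p hp
          obtain ⟨q, hq, he⟩ := List.mem_map.1 hp
          have := (List.mem_filter.1 hq).2
          simp only [decide_eq_true_eq] at this
          rw [← he]
          simp only
          omega
        have hblen : (base.length : Int) ≤ k := by
          rw [hbdef, List.length_map]
          have := List.length_filter_le (fun p : Int × Int => decide (t < p.2)) d.items
          omega
        constructor
        · apply PySem.Dict.ext
          rw [mgEvict k x j d hnd hpos hemp hcf hk, hrs]
          simp only
          by_cases hcond : t < (j : Int) + 1
          · rw [if_pos hcond, if_pos hcond, PySem.Dict.items_insert_of_not_contains d' _ hc',
              hd'items]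
          · rw [if_neg hcond, if_neg hcond, hd'items]
        · rw [hrs]
          simp only
          by_cases hcond : t < (j : Int) + 1
          · rw [if_pos hcond]
            refine ⟨PySem.Dict.nodup_keys_insert d' x _ hnd', ?_, ?_⟩
            · rw [PySem.Dict.items_insert_of_not_contains d' _ hc']
              intro p hp
              rcases List.mem_append.1 hp with h | h
              · exact hpos' p h
              · simp only [List.mem_singleton] at h
                rw [h]
                simp only
                omega
            · rw [PySem.Dict.items_insert_of_not_contains d' _ hc', hd'items]
              right
              -- t < j+1 forces t = min count, whose holder is filtered out: strict room
              obtain ⟨mv, hmv⟩ : ∃ mv, PySem.List.min? d.values (fun v => v) = some mv := by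
                cases hmin : PySem.List.min? d.values (fun v => v) with
                | none =>
                  rw [PySem.List.min?_eq_none_iff] at hmin
                  simp only [PySem.Dict.values] at hmin
                  exact absurd (List.map_eq_nil_iff.mp hmin) hemp
                | some mv => exact ⟨mv, rfl⟩
              obtain ⟨p0, hp0, he0⟩ : ∃ p ∈ d.items, p.2 = mv := by
                have := PySem.List.min?_mem hmv
                simp only [PySem.Dict.values, List.mem_map] at this
                obtain ⟨p, hp, he⟩ := this
                exact ⟨p, hp, he⟩
              have htmv : t = mv := by
                rw [htdef, hmv, Option.getD_some]
                rw [hmv, Option.getD_some] at htdef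
                omega
              have : (d.items.filter (fun p => decide (t < p.2))).length < d.items.length := by
                apply List.length_filter_lt_length_iff_exists.2
                exact ⟨p0, hp0, by simp [he0, htmv]⟩
              rw [hbdef, List.length_append, List.length_singleton, List.length_map]
              push_cast
              omega
          · rw [if_neg hcond]
            exact ⟨hnd', hpos', Or.inr (hd'items ▸ hblen)⟩

-- the loop equivalence carried along the whole stream (induction on a length bound,
-- consuming one run per step exactly as mgAltGo does)
lemma mg_loop_bounded (k : Int) : ∀ (n : Nat) (stream : List Int), stream.length ≤ n →
    ∀ d : PySem.Dict Int Int, mgInv k d →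
    stream.foldl (mgStepA k) d = mgAltGo k d stream := by
  intro n
  induction n with
  | zero =>
    intro stream hlen d _
    rw [List.length_eq_zero_iff.mp (Nat.le_zero.mp hlen), List.foldl_nil, mgAltGo]
  | succ n ih =>
    intro stream hlen d hinv
    cases stream with
    | nil => rw [List.foldl_nil, mgAltGo]
    | cons x t =>
      have hsplit : x :: t
          = List.replicate ((t.takeWhile (fun y => y == x)).length + 1) x
            ++ t.dropWhile (fun y => y == x) := by
        have h1 : x :: t.takeWhile (fun y => y == x)
            = List.replicate ((t.takeWhile (fun y => y == x)).length + 1) x := by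
          rw [List.eq_replicate_iff]
          constructor
          · simp
          · intro b hb
            rcases List.mem_cons.1 hb with h | h
            · exact h
            · have := List.mem_takeWhile_imp h
              exact eq_of_beq this
        rw [← h1]
        simp only [List.cons_append, List.takeWhile_append_dropWhile]
      have hrun := mgRun k x ((t.takeWhile (fun y => y == x)).length) d hinv
      calc (x :: t).foldl (mgStepA k) d
          = (t.dropWhile (fun y => y == x)).foldl (mgStepA k)
              ((List.replicate ((t.takeWhile (fun y => y == x)).length + 1) x).foldl
                (mgStepA k) d) := by
            conv_lhs => rw [hsplit]
            rw [List.foldl_append]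
        _ = (t.dropWhile (fun y => y == x)).foldl (mgStepA k)
              (mgRunStep k d x (((t.takeWhile (fun y => y == x)).length : Int) + 1)) := by
            rw [hrun.1]
        _ = mgAltGo k (mgRunStep k d x (((t.takeWhile (fun y => y == x)).length : Int) + 1))
              (t.dropWhile (fun y => y == x)) := by
            apply ih
            · have := List.length_dropWhile_le (fun y => y == x) t
              simp only [List.length_cons] at hlen
              omega
            · exact hrun.2
        _ = mgAltGo k d (x :: t) := by
            rw [mgAltGo]

-- the loop equivalence
lemma mg_loop (k : Int) (stream : List Int) (d : PySem.Dict Int Int) (hinv : mgInv k d) :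
    stream.foldl (mgStepA k) d = mgAltGo k d stream :=
  mg_loop_bounded k stream.length stream le_rfl d hinv

-- ===== VERDICT (by name: the statement is the Claim_ definition above) =====
theorem misra_gries_spec : Claim_equal_misra_gries := by
  intro stream k _
  show misra_gries stream k = misra_gries_alt stream k
  unfold misra_gries misra_gries_alt
  rw [mg_loop k stream PySem.Dict.empty ⟨by simp, by simp [PySem.Dict.empty], Or.inl rfl⟩]
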